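-- pv_equiv track=rewrite | github.com/Rashik8606/DSA | Arrays/same_number_last_sorting.py | sort_arr_last
-- ===== SOURCE A (Python) =====
-- def sort_arr_last(array):
--     count_dict = {}
--     for i in array:
--         if i in count_dict:
--             count_dict[i] +=1
--         else:
--             count_dict[i] = 1
--
--     # return count_dict
--
--     unique_arr = []
--     duplicate_arr = []
--
--     for i in array:
--         if count_dict[i] == 1:
--             unique_arr.append(i)
--         else:
--             duplicate_arr.append(i)
--
--     for i in range(len(unique_arr)):
--         for j in range(len(unique_arr)-i-1):
--             if unique_arr[j] > unique_arr[j+1]: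
--                 temp = unique_arr[j]
--                 unique_arr[j] = unique_arr[j+1]
--                 unique_arr[j+1] = temp
--
--     for i in range(len(duplicate_arr)):
--         for j in range(len(duplicate_arr)-i-1):
--             if duplicate_arr[j] > duplicate_arr[j+1]:
--                 temp = duplicate_arr[j]
--                 duplicate_arr[j] = duplicate_arr[j+1]
--                 duplicate_arr[j+1] = temp
--
--     return unique_arr + duplicate_arr
-- ===== SOURCE B (Python) =====
-- def sort_arr_last(array):
--     counts = {}
--     for x in array:
--         counts[x] = counts.get(x, 0) + 1
--     unique, duplicate = [], []
--     for x in sorted(array):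
--         if counts[x] == 1:
--             unique.append(x)
--         else:
--             duplicate.append(x)
--     return unique + duplicate
-- ===== Notes on version B (the rewrite author's own statement) =====
-- stated objective: faster
-- what changed: Replaces A's partition-then-bubble-sort-each-half structure with one global O(n log n) sort followed by a single classifying pass that splits the sorted list into uniques and duplicates by count.
import Mathlib
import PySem

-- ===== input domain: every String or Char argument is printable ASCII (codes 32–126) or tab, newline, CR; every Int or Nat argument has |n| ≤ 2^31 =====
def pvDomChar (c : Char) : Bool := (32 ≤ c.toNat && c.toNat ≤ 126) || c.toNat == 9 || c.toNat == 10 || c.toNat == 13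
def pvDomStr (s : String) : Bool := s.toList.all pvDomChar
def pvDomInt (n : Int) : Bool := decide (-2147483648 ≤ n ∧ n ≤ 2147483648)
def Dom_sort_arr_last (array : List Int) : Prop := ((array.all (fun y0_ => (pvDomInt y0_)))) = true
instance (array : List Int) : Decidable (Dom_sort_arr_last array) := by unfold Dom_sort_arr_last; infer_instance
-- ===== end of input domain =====

-- B replaces A's partition-then-bubble-sort-each-half with one global sort plus a single
-- classifying pass (objective: faster, O(n log n) vs A's O(n^2) bubble sorts).

-- ===== PORT A =====
-- one round of A's inner loop: k comparisons of adjacent elements, left to right, swapping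
-- (structural-recursion rendering of 'for j in range(k): if arr[j] > arr[j+1]: swap')
def pvBPass : Nat → List Int → List Int
  | k+1, a :: b :: rest => if a > b then b :: pvBPass k (a :: rest) else a :: pvBPass k (b :: rest)
  | _, l => l

-- A's nested bubble-sort loops: 'for i in range(len(arr)): for j in range(len(arr)-i-1): …'
def pvBubble (l : List Int) : List Int :=
  let n : Int := l.length
  (PySem.List.pyRange 0 n 1).foldl (fun acc i => pvBPass (n - i - 1).toNat acc) l

def sort_arr_last (array : List Int) : List Int :=
  let count_dict := array.foldl
    (fun d i => if d.contains i then d.insert i (d.getD i 0 + 1) else d.insert i 1)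
    (PySem.Dict.empty : PySem.Dict Int Int)
  let p := array.foldl
    (fun (p : List Int × List Int) i =>
      if count_dict.getD i 0 == 1 then (p.1 ++ [i], p.2) else (p.1, p.2 ++ [i]))
    ([], [])
  pvBubble p.1 ++ pvBubble p.2

-- ===== PORT B =====
def sort_arr_last_alt (array : List Int) : List Int :=
  let counts := array.foldl (fun d x => d.insert x (d.getD x 0 + 1)) (PySem.Dict.empty : PySem.Dict Int Int)
  let p := (PySem.List.sorted array (fun x => x) false).foldl
    (fun (p : List Int × List Int) x =>
      if counts.getD x 0 == 1 then (p.1 ++ [x], p.2) else (p.1, p.2 ++ [x]))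
    ([], [])
  p.1 ++ p.2

-- ===== PRECONDITION & SPEC =====
def Spec_sort_arr_last (array : List Int) (out : List Int) : Prop := out = sort_arr_last_alt array
instance (array : List Int) (out : List Int) : Decidable (Spec_sort_arr_last array out) := by unfold Spec_sort_arr_last; infer_instance

-- ===== CLAIM (what is proved, stated in full; the proofs are below) =====
def Claim_equal_sort_arr_last : Prop := ∀ (array : List Int), Dom_sort_arr_last array → Spec_sort_arr_last array (sort_arr_last array)

-- ===== LEMMAS AND PROOFS =====

theorem pvBPass_perm : ∀ (k : Nat) (l : List Int), (pvBPass k l).Perm l := by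
  intro k l
  induction k generalizing l with
  | zero => cases l <;> simp [pvBPass]
  | succ k ih =>
    match l with
    | [] => simp [pvBPass]
    | [a] => simp [pvBPass]
    | a :: b :: rest =>
      simp only [pvBPass]
      split
      · exact ((ih (a :: rest)).cons b).trans (List.Perm.swap a b rest)
      · exact (ih (b :: rest)).cons a

-- a full pass (fuel = length - 1) moves a maximal element to the last position
theorem pvBPass_max : ∀ (t : List Int) (a : Int),
    ∃ r M, pvBPass t.length (a :: t) = r ++ [M] ∧ (∀ x ∈ a :: t, x ≤ M) := by
  intro t
  induction t with
  | nil => intro a; exact ⟨[], a, by simp [pvBPass], by simp⟩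
  | cons b t ih =>
    intro a
    simp only [List.length_cons, pvBPass]
    split
    · rename_i hab
      obtain ⟨r, M, hr, hM⟩ := ih a
      refine ⟨b :: r, M, by simp [hr], ?_⟩
      intro x hx
      simp only [List.mem_cons] at hx
      rcases hx with rfl | rfl | hx
      · exact hM x (by simp)
      · exact le_trans (le_of_lt hab) (hM a (by simp))
      · exact hM x (by simp [hx])
    · rename_i hab
      obtain ⟨r, M, hr, hM⟩ := ih b
      refine ⟨a :: r, M, by simp [hr], ?_⟩
      intro x hx
      simp only [List.mem_cons] at hx
      rcases hx with rfl | rfl | hx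
      · exact le_trans (by omega) (hM b (by simp))
      · exact hM x (by simp)
      · exact hM x (by simp [hx])

-- a pass with fuel = length of the left part - 1 never touches the right part
theorem pvBPass_split : ∀ (t s : List Int) (a : Int),
    pvBPass t.length (a :: t ++ s) = pvBPass t.length (a :: t) ++ s := by
  intro t
  induction t with
  | nil => intro s a; simp [pvBPass]
  | cons b t ih =>
    intro s a
    simp only [List.length_cons, List.cons_append, pvBPass]
    split <;> simp [← ih]

-- A's outer loop, unrolled by remaining iteration count (fuel m-1, then m-2, …, 0)
def pvBub : Nat → List Int → List Int
  | 0, l => l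
  | k+1, l => pvBub k (pvBPass k l)

-- invariant: after the passes, the result is a sorted permutation
theorem pvBub_inv : ∀ (k : Nat) (q s : List Int), q.length = k → s.Pairwise (· ≤ ·) →
    (∀ a ∈ q, ∀ b ∈ s, a ≤ b) →
    (pvBub k (q ++ s)).Perm (q ++ s) ∧ (pvBub k (q ++ s)).Pairwise (· ≤ ·) := by
  intro k
  induction k with
  | zero =>
    intro q s hq hs _
    rw [List.length_eq_zero_iff] at hq
    subst hq
    exact ⟨List.Perm.refl _, by simpa using hs⟩
  | succ k ih =>
    intro q s hq hs hqs
    match q, hq with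
    | a :: t, hq =>
      have hk : t.length = k := by simpa using hq
      obtain ⟨r, M, hr, hM⟩ := pvBPass_max t a
      have hperm1 : (r ++ [M]).Perm (a :: t) := hr ▸ pvBPass_perm t.length (a :: t)
      have hMmem : M ∈ a :: t := hperm1.mem_iff.1 (by simp)
      have hrmem : ∀ x ∈ r, x ∈ a :: t := fun x hx => hperm1.mem_iff.1 (by simp [hx])
      have hstep : pvBPass k (a :: t ++ s) = r ++ (M :: s) := by
        rw [← hk, pvBPass_split, hr, List.append_assoc]; rfl
      have hrlen : r.length = k := by
        have := hperm1.length_eq; simp at this; omega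
      have hMs : (M :: s).Pairwise (· ≤ ·) := by
        refine List.Pairwise.cons (fun b hb => hqs M hMmem b hb) hs
      have hrs : ∀ x ∈ r, ∀ b ∈ M :: s, x ≤ b := by
        intro x hx b hb
        rcases List.mem_cons.1 hb with rfl | hb
        · exact hM x (hrmem x hx)
        · exact hqs x (hrmem x hx) b hb
      obtain ⟨hp, hpw⟩ := ih r (M :: s) hrlen hMs hrs
      have hperm2 : (r ++ M :: s).Perm (a :: t ++ s) := by
        have he : r ++ M :: s = (r ++ [M]) ++ s := by simp
        rw [he]; exact hperm1.append_right s
      refine ⟨?_, ?_⟩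
      · show (pvBub k (pvBPass k (a :: t ++ s))).Perm _
        rw [hstep]
        exact hp.trans hperm2
      · show (pvBub k (pvBPass k (a :: t ++ s))).Pairwise _
        rw [hstep]; exact hpw

-- bridge: the port's foldl over pyRange is pvBub
theorem pyfold_eq_pvBub : ∀ (m : Nat) (j n : Int) (l : List Int), 0 ≤ j → n = j + m →
    (PySem.List.pyRange j n 1).foldl (fun acc i => pvBPass (n - i - 1).toNat acc) l
      = pvBub m l := by
  intro m
  induction m with
  | zero =>
    intro j n l hj hn
    rw [PySem.List.pyRange_one_eq_nil (by omega)]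
    rfl
  | succ m ih =>
    intro j n l hj hn
    rw [PySem.List.pyRange_one_cons (by omega)]
    simp only [List.foldl_cons]
    have h1 : (n - j - 1).toNat = m := by omega
    rw [h1]
    rw [ih (j + 1) n _ (by omega) (by omega)]
    rfl

theorem pvBubble_eq_sorted (l : List Int) :
    pvBubble l = PySem.List.sorted l (fun x => x) false := by
  have hb : pvBubble l = pvBub l.length l := by
    unfold pvBubble
    exact pyfold_eq_pvBub l.length 0 l.length l le_rfl (by omega)
  have h := pvBub_inv l.length l [] rfl (by simp) (by simp)
  rw [List.append_nil] at h
  rw [hb]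
  exact (PySem.List.sorted_id_eq_of_perm_of_pairwise _ _ h.1 h.2).symm

-- the single loop appending into two lists is a partition into the two filters
theorem foldl_partition (c : Int → Bool) : ∀ (l a b : List Int),
    l.foldl (fun p x => if c x then (p.1 ++ [x], p.2) else (p.1, p.2 ++ [x])) (a, b)
      = (a ++ l.filter c, b ++ l.filter (fun x => !c x)) := by
  intro l
  induction l with
  | nil => intro a b; simp
  | cons x l ih =>
    intro a b
    simp only [List.foldl_cons, List.filter_cons]
    cases h : c x
    · rw [if_neg (by simp), if_neg (by simp), if_pos (by simp), ih]
      simp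
    · rw [if_pos rfl, if_pos rfl, if_neg (by simp), ih]
      simp

-- A's 'if i in d: d[i]+=1 else: d[i]=1' loop builds the same dict as B's 'd[x]=d.get(x,0)+1'
theorem counter_eq (array : List Int) :
    array.foldl
      (fun d i => if d.contains i then d.insert i (d.getD i 0 + 1) else d.insert i 1)
      (PySem.Dict.empty : PySem.Dict Int Int)
    = array.foldl (fun d x => d.insert x (d.getD x 0 + 1)) (PySem.Dict.empty : PySem.Dict Int Int) := by
  have hf : (fun (d : PySem.Dict Int Int) i =>
      if d.contains i then d.insert i (d.getD i 0 + 1) else d.insert i 1)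
      = fun d x => d.insert x (d.getD x 0 + 1) := by
    funext d i
    by_cases h : d.contains i
    · simp [h]
    · have h' : d.contains i = false := by simpa using h
      simp [h', PySem.Dict.getD_of_not_contains]
  exact congrArg (fun f => array.foldl f PySem.Dict.empty) hf

-- filtering the globally sorted list is sorting the filtered list
theorem filter_sorted_eq (l : List Int) (c : Int → Bool) :
    (PySem.List.sorted l (fun x => x) false).filter c
      = PySem.List.sorted (l.filter c) (fun x => x) false := by
  have h1 : ((PySem.List.sorted l (fun x => x) false).filter c).Perm (l.filter c) :=
    (PySem.List.sorted_perm l (fun x => x) false).filter c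
  have h2 : ((PySem.List.sorted l (fun x => x) false).filter c).Pairwise (· ≤ ·) :=
    List.Pairwise.filter c (by simpa using PySem.List.sorted_pairwise l (fun x => x))
  exact (PySem.List.sorted_id_eq_of_perm_of_pairwise _ _ h1 h2).symm

-- foldl_partition specialised to the count test the two ports use
theorem foldl_partition_d (d : PySem.Dict Int Int) (l a b : List Int) :
    l.foldl (fun p i => if d.getD i 0 == 1 then (p.1 ++ [i], p.2) else (p.1, p.2 ++ [i])) (a, b)
      = (a ++ l.filter (fun i => d.getD i 0 == 1),
         b ++ l.filter (fun i => !(d.getD i 0 == 1))) :=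
  foldl_partition (fun i => d.getD i 0 == 1) l a b

-- ===== VERDICT (by name: the statement is the Claim_ definition above) =====
theorem sort_arr_last_spec : Claim_equal_sort_arr_last := by
  intro array _
  unfold Spec_sort_arr_last sort_arr_last sort_arr_last_alt
  rw [counter_eq]
  dsimp only
  rw [foldl_partition_d, foldl_partition_d]
  dsimp only
  simp only [List.nil_append]
  rw [pvBubble_eq_sorted, pvBubble_eq_sorted, filter_sorted_eq, filter_sorted_eq]
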